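-- pv_equiv track=rewrite | github.com/paulalexeevich/PlanoAgent | placement_optimization.py | _fallback_level_depth
-- ===== SOURCE A (Python) =====
-- def _fallback_level_depth(a: tuple, b: tuple) -> int:
--     """Compute best hierarchical match depth with explicit level fallback.
--
--     For each start level i (L0..LN), try matching from i downward:
--       - both present + equal => count
--       - both present + different => stop this chain (keep depth so far)
--       - missing on either side => skip (unknown)
--     Returns the maximum matched depth across all starts.
--     """
--     n = min(len(a), len(b))
--     best = 0
--     for start in range(n):
--         depth = 0
--         compared = 0
--         for idx in range(start, n):
--             av = a[idx]
--             bv = b[idx]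
--             if av and bv:
--                 compared += 1
--                 if av != bv:
--                     break
--                 depth += 1
--         if compared > 0 and depth > best:
--             best = depth
--     return best
-- ===== SOURCE B (Python) =====
-- def _fallback_level_depth(a: tuple, b: tuple) -> int:
--     """Single pass: run length of equal both-present pairs, reset at a
--     both-present mismatch, skipping levels missing on either side; the
--     answer is the maximum run seen."""
--     best = 0
--     cnt = 0
--     for av, bv in zip(a, b):
--         if av and bv:
--             if av == bv:
--                 cnt += 1
--                 if cnt > best:
--                     best = cnt
--             else:
--                 cnt = 0
--     return best
-- ===== Notes on version B (the rewrite author's own statement) =====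
-- stated objective: faster
-- what changed: Replaced the quadratic restart-at-every-level double loop by a single left-to-right pass that keeps a running count of equal both-present pairs, resets it at a both-present mismatch, and tracks the maximum.
import Mathlib
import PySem

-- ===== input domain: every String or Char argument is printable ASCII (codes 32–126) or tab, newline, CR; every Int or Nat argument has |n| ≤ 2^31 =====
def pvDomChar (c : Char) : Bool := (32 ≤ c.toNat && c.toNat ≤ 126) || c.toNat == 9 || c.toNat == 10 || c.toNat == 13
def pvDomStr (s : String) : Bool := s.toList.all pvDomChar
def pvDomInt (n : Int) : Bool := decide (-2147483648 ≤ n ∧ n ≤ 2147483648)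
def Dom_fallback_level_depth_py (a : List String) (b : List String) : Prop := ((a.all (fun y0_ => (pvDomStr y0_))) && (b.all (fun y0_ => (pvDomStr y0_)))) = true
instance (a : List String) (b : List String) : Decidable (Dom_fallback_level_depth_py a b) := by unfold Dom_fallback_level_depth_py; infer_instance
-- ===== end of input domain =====

-- B replaces A's quadratic restart-at-every-level double loop by one linear pass
-- (running equal-run count, reset at a both-present mismatch, max tracked): faster.


-- ===== PORT A =====
-- inner `for idx in range(start, n)` loop of A: walks the pairs (a[idx], b[idx])
-- for idx ≥ start (the suffix of a.zip b), threading (depth, compared); a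
-- both-present mismatch is the `break` (returns the state so far).
def innerA : List (String × String) → Int × Int → Int × Int
  | [], st => st
  | (av, bv) :: rest, (depth, compared) =>
    if av ≠ "" ∧ bv ≠ "" then
      if av ≠ bv then (depth, compared + 1)
      else innerA rest (depth + 1, compared + 1)
    else innerA rest (depth, compared)

-- A: `for start in range(n)` with n = min(len(a), len(b)); indexing a[idx], b[idx]
-- for idx in [start, n) is exactly the suffix (a.zip b).drop start.
def fallback_level_depth_py (a : List String) (b : List String) : Int :=
  let n := min a.length b.length
  (List.range n).foldl
    (fun best start =>
      let r := innerA ((a.zip b).drop start) (0, 0)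
      if r.2 > 0 ∧ r.1 > best then r.1 else best) 0

-- ===== PORT B =====
-- Source B's single pass: cnt = current run of equal both-present pairs, best = max run.
def altLoop : List (String × String) → Int → Int → Int
  | [], best, _ => best
  | (av, bv) :: rest, best, cnt =>
    if av ≠ "" ∧ bv ≠ "" then
      if av = bv then
        altLoop rest (if cnt + 1 > best then cnt + 1 else best) (cnt + 1)
      else altLoop rest best 0
    else altLoop rest best cnt

def fallback_level_depth_py_alt (a : List String) (b : List String) : Int :=
  altLoop (a.zip b) 0 0

-- ===== PRECONDITION & SPEC =====
def Spec_fallback_level_depth_py (a : List String) (b : List String) (out : Int) : Prop := out = fallback_level_depth_py_alt a b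
instance (a : List String) (b : List String) (out : Int) : Decidable (Spec_fallback_level_depth_py a b out) := by unfold Spec_fallback_level_depth_py; infer_instance

-- ===== CLAIM (what is proved, stated in full; the proofs are below) =====
def Claim_equal_fallback_level_depth_py : Prop := ∀ (a : List String) (b : List String), Dom_fallback_level_depth_py a b → Spec_fallback_level_depth_py a b (fallback_level_depth_py a b)

-- ===== LEMMAS AND PROOFS =====

-- depth / compared of a chain started fresh at the head of l
def dfun (l : List (String × String)) : Int := (innerA l (0, 0)).1
def cfun (l : List (String × String)) : Int := (innerA l (0, 0)).2

-- max over all suffix starts of dfun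
def sMax : List (String × String) → Int
  | [] => 0
  | l@(_ :: rest) => max (dfun l) (sMax rest)

lemma innerA_shift (l : List (String × String)) : ∀ d c : Int,
    innerA l (d, c) = ((innerA l (0, 0)).1 + d, (innerA l (0, 0)).2 + c) := by
  induction l with
  | nil => intro d c; simp [innerA]
  | cons p rest ih =>
    intro d c
    obtain ⟨av, bv⟩ := p
    simp only [innerA]
    split_ifs with h1 h2
    · simp only [Prod.mk.injEq]; constructor <;> ring
    · rw [ih (d + 1) (c + 1), ih (0 + 1) (0 + 1)]
      simp only [Prod.mk.injEq]; constructor <;> ring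
    · rw [ih d c]

lemma dfun_cons (av bv : String) (rest : List (String × String)) :
    dfun ((av, bv) :: rest) =
      if av ≠ "" ∧ bv ≠ "" then (if av = bv then 1 + dfun rest else 0) else dfun rest := by
  simp only [dfun, innerA]
  split_ifs with h1 h2 h3
  all_goals first
    | rfl
    | (exfalso; tauto)
    | (rw [innerA_shift]; ring)

lemma cfun_cons (av bv : String) (rest : List (String × String)) :
    cfun ((av, bv) :: rest) =
      if av ≠ "" ∧ bv ≠ "" then (if av = bv then 1 + cfun rest else 1) else cfun rest := by
  simp only [cfun, innerA]
  split_ifs with h1 h2 h3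
  all_goals first
    | rfl
    | (exfalso; tauto)
    | (rw [innerA_shift]; ring)

lemma dfun_nonneg (l : List (String × String)) : 0 ≤ dfun l := by
  induction l with
  | nil => simp [dfun, innerA]
  | cons p rest ih =>
    obtain ⟨av, bv⟩ := p
    rw [dfun_cons]
    split_ifs <;> omega

lemma dfun_le_cfun (l : List (String × String)) : dfun l ≤ cfun l := by
  induction l with
  | nil => simp [dfun, cfun, innerA]
  | cons p rest ih =>
    obtain ⟨av, bv⟩ := p
    rw [dfun_cons, cfun_cons]
    have := dfun_nonneg rest
    split_ifs <;> omega

lemma sMax_nonneg (l : List (String × String)) : 0 ≤ sMax l := by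
  cases l with
  | nil => simp [sMax]
  | cons p rest => simp only [sMax]; exact le_max_of_le_left (dfun_nonneg _)

lemma dfun_le_sMax (l : List (String × String)) : dfun l ≤ sMax l := by
  cases l with
  | nil => simp [sMax, dfun, innerA]
  | cons p rest => simp [sMax]

-- the outer loop of A equals max best (sMax ps), for best ≥ 0
lemma outerA_eq (ps : List (String × String)) : ∀ best : Int, 0 ≤ best →
    (List.range ps.length).foldl
      (fun best start =>
        let r := innerA (ps.drop start) (0, 0)
        if r.2 > 0 ∧ r.1 > best then r.1 else best) best
    = max best (sMax ps) := by
  induction ps with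
  | nil => intro best h; simp [sMax]; omega
  | cons p rest ih =>
    intro best hb
    rw [List.length_cons, List.range_succ_eq_map, List.foldl_cons, List.foldl_map]
    have hstep0 :
        (let r := innerA ((p :: rest).drop 0) (0, 0)
         if r.2 > 0 ∧ r.1 > best then r.1 else best) = max best (dfun (p :: rest)) := by
      simp only [List.drop_zero]
      by_cases h : (innerA (p :: rest) (0, 0)).1 > best
      · have hc : (innerA (p :: rest) (0, 0)).2 > 0 := by
          have h1 := dfun_le_cfun (p :: rest)
          simp only [dfun, cfun] at h1
          omega
        simp only [dfun]
        rw [if_pos ⟨hc, h⟩]; omega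
      · simp only [dfun]
        rw [if_neg (by tauto)]; omega
    rw [hstep0]
    simp only [List.drop_succ_cons]
    rw [ih _ (le_max_of_le_right (dfun_nonneg _))]
    simp only [sMax]
    omega

-- invariant of B's single pass
lemma altLoop_eq (ps : List (String × String)) : ∀ best cnt : Int,
    0 ≤ cnt → cnt ≤ best →
    altLoop ps best cnt = max best (max (cnt + dfun ps) (sMax ps)) := by
  induction ps with
  | nil => intro best cnt h0 h1; simp [altLoop, dfun, innerA, sMax]; omega
  | cons p rest ih =>
    intro best cnt h0 h1
    obtain ⟨av, bv⟩ := p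
    have hd := dfun_nonneg rest
    have hs := dfun_le_sMax rest
    have hs0 := sMax_nonneg rest
    simp only [altLoop, sMax]
    rw [dfun_cons]
    split_ifs with h1' h2 h3
    · -- both present, equal, new best
      rw [ih (cnt + 1) (cnt + 1) (by omega) le_rfl]; omega
    · -- both present, equal, best unchanged
      rw [ih best (cnt + 1) (by omega) (by omega)]; omega
    · -- both present, mismatch
      rw [ih best 0 le_rfl (by omega)]; omega
    · -- skip
      rw [ih best cnt h0 h1]; omega

-- ===== VERDICT (by name: the statement is the Claim_ definition above) =====
theorem fallback_level_depth_py_spec : Claim_equal_fallback_level_depth_py := by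
  intro a b _
  unfold Spec_fallback_level_depth_py fallback_level_depth_py fallback_level_depth_py_alt
  have hlen : min a.length b.length = (a.zip b).length := (List.length_zip ..).symm
  simp only [hlen]
  rw [outerA_eq (a.zip b) 0 le_rfl, altLoop_eq (a.zip b) 0 0 le_rfl le_rfl]
  have := dfun_le_sMax (a.zip b)
  have := sMax_nonneg (a.zip b)
  omega
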